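-- pv_equiv track=rewrite | github.com/guilhermegouw/data-structures-and-algorithms | python/problems/equilibrium_index_array/challenge.py | get_equilibrium_indexes
-- ===== SOURCE A (Python) =====
-- def get_equilibrium_indexes(lst):
--     equilibrium_indexes = []
--     total_sum = sum(lst)
--     left_sum = 0
--
--     for i in range(len(lst)):
--         right_sum = total_sum - left_sum - lst[i]
--         if left_sum == right_sum:
--             equilibrium_indexes.append(i)
--         left_sum += lst[i]
--     return equilibrium_indexes
-- ===== SOURCE B (Python) =====
-- def _prefix_sums(lst):
--     # sums[i] = sum of lst[:i]; length len(lst)+1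
--     sums = [0]
--     s = 0
--     for x in lst:
--         s += x
--         sums.append(s)
--     return sums
--
--
-- def _suffix_sums(lst):
--     # sums[i] = sum of lst[i:]; length len(lst)+1
--     rev = [0]
--     s = 0
--     for x in reversed(lst):
--         s += x
--         rev.append(s)
--     rev.reverse()
--     return rev
--
--
-- def get_equilibrium_indexes(lst):
--     prefix = _prefix_sums(lst)
--     suffix = _suffix_sums(lst)
--     return [i for i in range(len(lst)) if prefix[i] == suffix[i + 1]]
-- ===== Notes on version B (the rewrite author's own statement) =====
-- stated objective: alternative
-- what changed: Replaces the single running-accumulator pass (left_sum updated in the loop, right_sum derived from the total each step) with two precomputed tables - an exclusive prefix-sum array and a suffix-sum array built over the reversed list - followed by a separate comparison pass over the indices.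
import Mathlib
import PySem

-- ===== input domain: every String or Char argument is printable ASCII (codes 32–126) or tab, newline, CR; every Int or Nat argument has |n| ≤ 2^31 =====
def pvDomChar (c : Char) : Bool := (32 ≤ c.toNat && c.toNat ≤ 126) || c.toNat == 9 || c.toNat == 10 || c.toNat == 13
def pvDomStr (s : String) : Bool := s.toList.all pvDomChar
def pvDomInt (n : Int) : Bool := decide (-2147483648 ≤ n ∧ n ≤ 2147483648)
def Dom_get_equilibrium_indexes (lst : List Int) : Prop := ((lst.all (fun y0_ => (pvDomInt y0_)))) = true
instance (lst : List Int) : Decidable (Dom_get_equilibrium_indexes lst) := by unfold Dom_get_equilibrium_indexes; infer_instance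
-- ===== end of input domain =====

-- B replaces A's single running-accumulator pass with precomputed prefix/suffix sum tables and a
-- separate comparison pass (objective: alternative decomposition, same O(n) cost).

-- ===== PORT A =====
-- A: one pass with total_sum, running left_sum, right_sum derived each step.
def get_equilibrium_indexes (lst : List Int) : List Int :=
  let total_sum := lst.sum
  ((List.range lst.length).foldl
    (fun (st : List Int × Int) i =>
      let right_sum := total_sum - st.2 - lst.getD i 0
      (if st.2 == right_sum then st.1 ++ [(i : Int)] else st.1, st.2 + lst.getD i 0))
    ([], 0)).1

-- ===== PORT B =====
-- the 'for x in lst: s += x; sums.append(s)' loop of _prefix_sums / _suffix_sums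
def pvScan (s : Int) : List Int → List Int
  | [] => []
  | x :: xs => (s + x) :: pvScan (s + x) xs

def pvPrefixSums (lst : List Int) : List Int := 0 :: pvScan 0 lst

def pvSuffixSums (lst : List Int) : List Int := (0 :: pvScan 0 lst.reverse).reverse

def get_equilibrium_indexes_alt (lst : List Int) : List Int :=
  let pre := pvPrefixSums lst
  let suf := pvSuffixSums lst
  (List.range lst.length).filterMap (fun i =>
    if pre.getD i 0 == suf.getD (i + 1) 0 then some ((i : Int)) else none)

-- ===== PRECONDITION & SPEC =====
def Spec_get_equilibrium_indexes (lst : List Int) (out : List Int) : Prop := out = get_equilibrium_indexes_alt lst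
instance (lst : List Int) (out : List Int) : Decidable (Spec_get_equilibrium_indexes lst out) := by unfold Spec_get_equilibrium_indexes; infer_instance

-- ===== CLAIM (what is proved, stated in full; the proofs are below) =====
def Claim_equal_get_equilibrium_indexes : Prop := ∀ (lst : List Int), Dom_get_equilibrium_indexes lst → Spec_get_equilibrium_indexes lst (get_equilibrium_indexes lst)

-- ===== LEMMAS AND PROOFS =====

theorem pvScan_length (l : List Int) (s : Int) : (pvScan s l).length = l.length := by
  induction l generalizing s with
  | nil => rfl
  | cons x xs ih => simp [pvScan, ih]

theorem pvScan_getD (l : List Int) (s : Int) (i : Nat) (h : i < l.length) :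
    (pvScan s l).getD i 0 = s + (l.take (i + 1)).sum := by
  induction l generalizing s i with
  | nil => simp at h
  | cons x xs ih =>
    cases i with
    | zero => simp [pvScan]
    | succ j =>
      simp only [List.length_cons, Nat.add_lt_add_iff_right] at h
      show (pvScan (s + x) xs).getD j 0 = _
      rw [ih (s + x) j h]
      simp [List.take_succ_cons]; ring

theorem prefix_getD (l : List Int) (i : Nat) (h : i ≤ l.length) :
    (pvPrefixSums l).getD i 0 = (l.take i).sum := by
  cases i with
  | zero => simp [pvPrefixSums]
  | succ j =>
    have hj : j < l.length := h
    show (pvScan 0 l).getD j 0 = _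
    rw [pvScan_getD l 0 j hj]; ring

theorem suffix_getD (l : List Int) (j : Nat) (h : j ≤ l.length) :
    (pvSuffixSums l).getD j 0 = (l.drop j).sum := by
  unfold pvSuffixSums
  have hlen : (0 :: pvScan 0 l.reverse).length = l.length + 1 := by
    simp [pvScan_length]
  have hj : j < (0 :: pvScan 0 l.reverse).length := by omega
  rw [List.getD_eq_getElem?_getD, List.getElem?_reverse (by simpa using hj)]
  rw [hlen]
  have hidx : l.length + 1 - 1 - j = l.length - j := by omega
  rw [hidx]
  rcases Nat.eq_or_lt_of_le h with heq | hlt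
  · subst heq
    have : l.length - l.length = 0 := by omega
    rw [this]; simp
  · obtain ⟨k, hk⟩ : ∃ k, l.length - j = k + 1 := ⟨l.length - j - 1, by omega⟩
    rw [hk, List.getElem?_cons_succ, ← List.getD_eq_getElem?_getD]
    have hk' : k < l.reverse.length := by simp; omega
    rw [pvScan_getD l.reverse 0 k (by simpa using hk')]
    have htake : l.reverse.take (k + 1) = (l.drop (l.length - (k + 1))).reverse := by
      rw [List.take_reverse]
    rw [htake, List.sum_reverse]
    have : l.length - (k + 1) = j := by omega
    rw [this]; ring

-- (take (m+1)).sum = (take m).sum + lst[m]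
theorem sum_take_succ (l : List Int) (m : Nat) (hlt : m < l.length) :
    (l.take (m + 1)).sum = (l.take m).sum + l[m]?.getD 0 := by
  rw [List.take_add_one, List.sum_append]
  simp [List.getElem?_eq_getElem hlt]

-- characterisation of A's loop: after processing range n (n ≤ length),
-- accumulator = (filterMap of the equilibrium condition over range n, sum of first n elements)
theorem loopA_eq (lst : List Int) (n : Nat) (h : n ≤ lst.length) :
    ((List.range n).foldl
      (fun (st : List Int × Int) i =>
        (if st.2 == lst.sum - st.2 - lst.getD i 0 then st.1 ++ [(i : Int)] else st.1,
         st.2 + lst.getD i 0))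
      ([], 0)) =
    ((List.range n).filterMap (fun i =>
        if (lst.take i).sum == lst.sum - (lst.take i).sum - lst.getD i 0 then some ((i : Int)) else none),
     (lst.take n).sum) := by
  induction n with
  | zero => simp
  | succ m ih =>
    have hm : m ≤ lst.length := by omega
    have hlt : m < lst.length := by omega
    rw [List.range_succ, List.foldl_append, ih hm, List.filterMap_append]
    simp only [List.foldl_cons, List.foldl_nil, List.filterMap_cons, List.filterMap_nil]
    have hsum := sum_take_succ lst m hlt
    simp only [beq_iff_eq, List.getD_eq_getElem?_getD]
    by_cases hc : (lst.take m).sum = lst.sum - (lst.take m).sum - lst[m]?.getD 0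
    · rw [if_pos hc, if_pos hc, hsum]
    · rw [if_neg hc, if_neg hc, hsum]
      simp

-- ===== VERDICT (by name: the statement is the Claim_ definition above) =====
theorem get_equilibrium_indexes_spec : Claim_equal_get_equilibrium_indexes := by
  intro lst _
  unfold Spec_get_equilibrium_indexes get_equilibrium_indexes get_equilibrium_indexes_alt
  simp only []
  rw [loopA_eq lst lst.length le_rfl]
  apply List.filterMap_congr
  intro i hi
  have hlt : i < lst.length := List.mem_range.mp hi
  rw [prefix_getD lst i (le_of_lt hlt), suffix_getD lst (i + 1) hlt]
  have hsplit : lst.sum = (lst.take (i + 1)).sum + (lst.drop (i + 1)).sum := by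
    conv_lhs => rw [← List.take_append_drop (i + 1) lst]
    rw [List.sum_append]
  have hsum := sum_take_succ lst i hlt
  simp only [beq_iff_eq, List.getD_eq_getElem?_getD]
  by_cases hc : (lst.take i).sum = lst.sum - (lst.take i).sum - lst[i]?.getD 0
  · have h2 : (lst.take i).sum = (lst.drop (i + 1)).sum := by omega
    rw [if_pos hc, if_pos h2]
  · have h2 : ¬ (lst.take i).sum = (lst.drop (i + 1)).sum := by omega
    rw [if_neg hc, if_neg h2]
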